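-- pv_equiv track=rewrite | github.com/zz-xx/transformers | glue/wnli_utils.py | mask_after_diff_toks
-- ===== SOURCE A (Python) =====
-- MASK = "[MASK]"
--
-- def mask_after_diff_toks(tokens, mask):
--     active_seen = False
--     toks_sent = []
--     for i, m in enumerate(mask):
--         if m == 1:
--             active_seen = True
--         else:
--             if active_seen:
--                 toks_sent.append(tokens[i])
--                 tokens[i] = MASK
--     return tokens, toks_sent
-- ===== SOURCE B (Python) =====
-- MASK = "[MASK]"
--
-- def mask_after_diff_toks(tokens, mask):
--     # locate the first active position, then process only the suffix after it
--     try: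
--         first = mask.index(1)
--     except ValueError:
--         return tokens, []
--     collected = []
--     for i in range(first + 1, len(mask)):
--         if mask[i] != 1:
--             collected.append(tokens[i])
--             tokens[i] = MASK
--     return tokens, collected
-- ===== Notes on version B (the rewrite author's own statement) =====
-- stated objective: alternative
-- what changed: Replaces the single flag-threaded pass with a two-phase shape: find the index of the first active mask entry with list.index, then loop only over the suffix after it, masking and collecting non-active positions.
import Mathlib
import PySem

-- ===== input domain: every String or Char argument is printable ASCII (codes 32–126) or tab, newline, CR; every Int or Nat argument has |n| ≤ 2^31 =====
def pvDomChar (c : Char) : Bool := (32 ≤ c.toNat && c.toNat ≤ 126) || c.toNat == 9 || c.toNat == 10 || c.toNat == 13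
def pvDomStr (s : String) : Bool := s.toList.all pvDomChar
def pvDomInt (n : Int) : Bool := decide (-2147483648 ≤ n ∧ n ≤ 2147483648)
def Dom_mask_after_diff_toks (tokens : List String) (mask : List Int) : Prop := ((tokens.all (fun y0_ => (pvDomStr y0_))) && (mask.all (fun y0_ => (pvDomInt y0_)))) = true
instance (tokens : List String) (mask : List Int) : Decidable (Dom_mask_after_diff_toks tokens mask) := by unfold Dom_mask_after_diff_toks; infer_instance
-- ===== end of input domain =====

-- B locates the first active index with list.index and then processes only the suffix after it,
-- instead of A's single flag-threaded pass; both Pythons mutate `tokens` in place identically —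
-- the theorems here are about the returned pair.

-- ===== PORT A =====
-- A's for-loop over enumerate(mask), threading (active_seen, tokens, toks_sent)
def pvALoop (toks : List String) (rest : List Int) (i : Nat) (active : Bool)
    (sent : List String) : List String × List String :=
  match rest with
  | [] => (toks, sent)
  | m :: ms =>
    if m = 1 then pvALoop toks ms (i+1) true sent
    else if active then
      pvALoop (PySem.List.pySetD toks (i : Int) "[MASK]") ms (i+1) active
        (sent ++ [PySem.List.pyGetD toks (i : Int) ""])
    else pvALoop toks ms (i+1) active sent

def mask_after_diff_toks (tokens : List String) (mask : List Int) : List String × List String :=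
  pvALoop tokens mask 0 false []

-- ===== PORT B =====
-- body of B's `for i in range(first+1, len(mask))`
def pvBStep (mask : List Int) (s : List String × List String) (i : Int) :
    List String × List String :=
  if PySem.List.pyGetD mask i 0 ≠ 1 then
    (PySem.List.pySetD s.1 i "[MASK]", s.2 ++ [PySem.List.pyGetD s.1 i ""])
  else s

def mask_after_diff_toks_alt (tokens : List String) (mask : List Int) :
    List String × List String :=
  match PySem.List.index? mask 1 with
  | none => (tokens, [])
  | some f =>
    (PySem.List.pyRange ((f : Int) + 1) (mask.length : Int) 1).foldl (pvBStep mask) (tokens, [])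

-- ===== PRECONDITION & SPEC =====
-- Pre_ excludes exactly the inputs on which the Python A raises IndexError: a position after the
-- first active mask entry whose mask value is not 1 but which has no corresponding token.
def Pre_mask_after_diff_toks (tokens : List String) (mask : List Int) : Prop :=
  ∀ i < mask.length, (mask.getD i 0 ≠ 1 ∧ ∃ j ≤ i, mask.getD j 0 = 1) → i < tokens.length

instance (tokens : List String) (mask : List Int) : Decidable (Pre_mask_after_diff_toks tokens mask) := by
  unfold Pre_mask_after_diff_toks; infer_instance

def pvWitness_mask_after_diff_toks : List String × List Int := (["a", "b", "c"], [1, 0, 0])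

def Spec_mask_after_diff_toks (tokens : List String) (mask : List Int) (out : List String × List String) : Prop := out = mask_after_diff_toks_alt tokens mask
instance (tokens : List String) (mask : List Int) (out : List String × List String) : Decidable (Spec_mask_after_diff_toks tokens mask out) := by unfold Spec_mask_after_diff_toks; infer_instance

-- ===== CLAIM (what is proved, stated in full; the proofs are below) =====
def Claim_equal_mask_after_diff_toks : Prop := ∀ (tokens : List String) (mask : List Int), Dom_mask_after_diff_toks tokens mask → Pre_mask_after_diff_toks tokens mask → Spec_mask_after_diff_toks tokens mask (mask_after_diff_toks tokens mask)

-- ===== LEMMAS AND PROOFS =====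

-- A's loop with no active entry anywhere: nothing happens.
theorem pvALoop_no_one (rest : List Int) (toks sent : List String) (i : Nat)
    (h : ∀ m ∈ rest, m ≠ 1) : pvALoop toks rest i false sent = (toks, sent) := by
  induction rest generalizing i with
  | nil => rfl
  | cons m ms ih =>
    have hm : m ≠ 1 := h m (by simp)
    simp [pvALoop, hm]
    exact ih (i+1) (fun x hx => h x (by simp [hx]))

-- A's loop skips an inactive prefix.
theorem pvALoop_skip (pre rest : List Int) (toks sent : List String) (i : Nat)
    (h : ∀ m ∈ pre, m ≠ 1) :
    pvALoop toks (pre ++ rest) i false sent = pvALoop toks rest (i + pre.length) false sent := by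
  induction pre generalizing i with
  | nil => simp
  | cons m ms ih =>
    have hm : m ≠ 1 := h m (by simp)
    simp only [List.cons_append, pvALoop, hm, if_false]
    rw [ih (i+1) (fun x hx => h x (by simp [hx]))]
    have h2 : i + (m :: ms).length = i + 1 + ms.length := by
      simp only [List.length_cons]; omega
    rw [h2]
    simp

-- After the first active entry, A's flag is permanently true and its remaining pass computes
-- exactly B's fold over the index range of the suffix.
theorem pvFold_eq_aLoop (rest pre : List Int) (toks sent : List String) :
    (PySem.List.pyRange ((pre.length : Int)) (((pre ++ rest).length : Int)) 1).foldl
      (pvBStep (pre ++ rest)) (toks, sent) = pvALoop toks rest pre.length true sent := by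
  induction rest generalizing pre toks sent with
  | nil =>
    rw [PySem.List.pyRange_one_eq_nil (by simp)]
    rfl
  | cons m ms ih =>
    have hlt : (pre.length : Int) < ((pre ++ m :: ms).length : Int) := by
      have : pre.length < (pre ++ m :: ms).length := by simp
      exact_mod_cast this
    rw [PySem.List.pyRange_one_cons hlt]
    simp only [List.foldl_cons]
    have hget : PySem.List.pyGetD (pre ++ m :: ms) (pre.length : Int) 0 = m := by
      rw [PySem.List.pyGetD_natCast]
      simp [List.getD]
    have key := ih (pre ++ [m])
    by_cases hm : m = 1
    · -- mask value 1: B's step is a no-op, A re-sets the flag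
      have hstep : pvBStep (pre ++ m :: ms) (toks, sent) (pre.length : Int) = (toks, sent) := by
        simp [pvBStep, hm]
      rw [hstep]
      have hkey := key toks sent
      simp only [List.append_assoc, List.singleton_append, List.length_append,
        List.length_cons, List.length_nil, Nat.zero_add] at hkey ⊢
      rw [show ((pre.length : Int) + 1) = (((pre.length + 1 : Nat)) : Int) by push_cast; ring]
      rw [hkey]
      simp [pvALoop, hm]
    · -- mask value ≠ 1: both mask the token and collect it
      have hstep : pvBStep (pre ++ m :: ms) (toks, sent) (pre.length : Int) =
          (PySem.List.pySetD toks (pre.length : Int) "[MASK]",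
           sent ++ [PySem.List.pyGetD toks (pre.length : Int) ""]) := by
        simp [pvBStep, hm]
      rw [hstep]
      have hkey := key (PySem.List.pySetD toks (pre.length : Int) "[MASK]")
        (sent ++ [PySem.List.pyGetD toks (pre.length : Int) ""])
      simp only [List.append_assoc, List.singleton_append, List.length_append,
        List.length_cons, List.length_nil, Nat.zero_add] at hkey ⊢
      rw [show ((pre.length : Int) + 1) = (((pre.length + 1 : Nat)) : Int) by push_cast; ring]
      rw [hkey]
      simp [pvALoop, hm]

-- ===== VERDICT (by name: the statement is the Claim_ definition above) =====
theorem mask_after_diff_toks_spec : Claim_equal_mask_after_diff_toks := by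
  intro tokens mask _ _
  unfold Spec_mask_after_diff_toks mask_after_diff_toks mask_after_diff_toks_alt
  cases hidx : PySem.List.index? mask 1 with
  | none =>
    have hnot : (1 : Int) ∉ mask := (PySem.List.index?_eq_none_iff mask 1).1 hidx
    rw [pvALoop_no_one mask tokens [] 0 (fun m hm h1 => hnot (h1 ▸ hm))]
  | some f =>
    obtain ⟨pre, suf, hmask, hlen, hpre⟩ := (PySem.List.index?_eq_some_iff mask 1 f).1 hidx
    subst hmask
    have hA : pvALoop tokens (pre ++ 1 :: suf) 0 false [] =
        pvALoop tokens suf (pre.length + 1) true [] := by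
      rw [pvALoop_skip pre (1 :: suf) tokens [] 0 (fun m hm => by rintro rfl; exact hpre hm)]
      simp [pvALoop]
    rw [hA]
    have hB := pvFold_eq_aLoop suf (pre ++ [1]) tokens []
    simp only [List.append_assoc, List.singleton_append, List.length_append,
      List.length_cons, List.length_nil, Nat.zero_add] at hB ⊢
    rw [← hlen]
    rw [show ((pre.length : Int) + 1) = (((pre.length + 1 : Nat)) : Int) by push_cast; ring]
    exact hB.symm
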